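-- pv_equiv track=rewrite | github.com/zhukovgreen/interviews | branch_length.py | solution
-- ===== SOURCE A (Python) =====
-- def solution(arr):
--     # Type your solution here
--     arr = [i for i in arr if i != -1]
--
--     def traverse(parent, score):
--         left_child = 2 * parent + 1
--         right_child = 2 * parent + 2
--         try:
--             left_child_score = arr[left_child]
--         except IndexError:
--             return score
--         else:
--             right_child_score = (
--                 arr[right_child] if right_child <= len(arr) - 1 else 0
--             )
--             return traverse(
--                 left_child, score + left_child_score + right_child_score
--             )
--
--     try:
--         left_branch_score = traverse(1, arr[1])
--         right_branch_score = traverse(2, arr[2])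
--     except IndexError:
--         return ""
--     if left_branch_score == right_branch_score:
--         return ""
--     elif left_branch_score > right_branch_score:
--         return "Left"
--     else:
--         return "Right"
-- ===== SOURCE B (Python) =====
-- def solution(arr):
--     arr = [i for i in arr if i != -1]
--     n = len(arr)
--     if n < 3:
--         return ""
--
--     def branch(start):
--         parent = start
--         score = arr[start]
--         while True:
--             left = 2 * parent + 1
--             if left >= n:
--                 return score
--             score += arr[left]
--             if left + 1 < n:
--                 score += arr[left + 1]
--             parent = left
--
--     left_branch_score = branch(1)
--     right_branch_score = branch(2)
--     if left_branch_score == right_branch_score: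
--         return ""
--     elif left_branch_score > right_branch_score:
--         return "Left"
--     else:
--         return "Right"
-- ===== Notes on version B (the rewrite author's own statement) =====
-- stated objective: simpler
-- what changed: Replaces A's recursive traverse with try/except-driven control flow by an explicit length guard plus an iterative while-loop accumulating the branch score.
import Mathlib
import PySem

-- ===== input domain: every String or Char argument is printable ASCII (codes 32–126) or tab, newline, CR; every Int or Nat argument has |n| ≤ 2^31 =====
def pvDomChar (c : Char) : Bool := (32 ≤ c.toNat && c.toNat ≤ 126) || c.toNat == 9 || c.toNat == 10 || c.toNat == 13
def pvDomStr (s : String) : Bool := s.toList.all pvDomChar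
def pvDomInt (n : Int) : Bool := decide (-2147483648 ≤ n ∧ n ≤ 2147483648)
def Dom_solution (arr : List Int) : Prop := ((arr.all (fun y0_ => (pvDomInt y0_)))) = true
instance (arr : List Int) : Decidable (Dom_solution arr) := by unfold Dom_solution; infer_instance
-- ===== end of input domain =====

-- B replaces A's recursive descent with an iterative loop and an explicit length guard
-- replacing the try/except; same return value everywhere (objective: simpler decomposition).

-- ===== PORT A =====
-- A's inner recursive `traverse`; `parent` only ever takes the values 1, 2 and left-child
-- indices thereof, all nonnegative, so it is carried as a Nat (cast to Int at each pyGet?,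
-- matching Python's nonnegative indexing exactly).
def pvTraverseA (arr : List Int) (parent : Nat) (score : Int) : Int :=
  match h : PySem.List.pyGet? arr ((2 * parent + 1 : Nat) : Int) with
  | none => score                       -- except IndexError: return score
  | some leftScore =>
      let rightScore : Int :=
        if ((2 * parent + 2 : Nat) : Int) ≤ (arr.length : Int) - 1 then
          (PySem.List.pyGet? arr ((2 * parent + 2 : Nat) : Int)).getD 0   -- in range under the guard
        else 0
      pvTraverseA arr (2 * parent + 1) (score + leftScore + rightScore)
termination_by arr.length - parent
decreasing_by
  simp only [PySem.List.pyGet?_natCast] at h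
  have := (List.getElem?_eq_some_iff.mp h).1
  omega

-- Python computes traverse(1, arr[1]) before reading arr[2]; both are pure, so the two
-- IndexError sites are matched here before either traversal (same value on every input).
def pvCompareA (arr : List Int) : String :=
  match PySem.List.pyGet? arr 1 with
  | none => ""
  | some a1 =>
    match PySem.List.pyGet? arr 2 with
    | none => ""
    | some a2 =>
      let leftBranch := pvTraverseA arr 1 a1
      let rightBranch := pvTraverseA arr 2 a2
      if leftBranch = rightBranch then ""
      else if leftBranch > rightBranch then "Left"
      else "Right"

def solution (arr0 : List Int) : String :=
  pvCompareA (arr0.filter (fun i => i ≠ -1))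

-- ===== PORT B =====
-- Source B's while-loop `branch`, as a tail recursion over the loop state (parent, score).
def pvBranchB (arr : List Int) (parent : Nat) (score : Int) : Int :=
  if 2 * parent + 1 ≥ arr.length then score
  else
    pvBranchB arr (2 * parent + 1)
      (score + arr.getD (2 * parent + 1) 0 +
        (if 2 * parent + 2 < arr.length then arr.getD (2 * parent + 2) 0 else 0))
termination_by arr.length - parent
decreasing_by omega

def pvCompareB (arr : List Int) : String :=
  if arr.length < 3 then ""
  else
    let leftBranch := pvBranchB arr 1 (arr.getD 1 0)
    let rightBranch := pvBranchB arr 2 (arr.getD 2 0)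
    if leftBranch = rightBranch then ""
    else if leftBranch > rightBranch then "Left"
    else "Right"

def solution_alt (arr0 : List Int) : String :=
  pvCompareB (arr0.filter (fun i => i ≠ -1))

-- ===== PRECONDITION & SPEC =====
def Spec_solution (arr : List Int) (out : String) : Prop := out = solution_alt arr
instance (arr : List Int) (out : String) : Decidable (Spec_solution arr out) := by unfold Spec_solution; infer_instance

-- ===== CLAIM (what is proved, stated in full; the proofs are below) =====
def Claim_equal_solution : Prop := ∀ (arr : List Int), Dom_solution arr → Spec_solution arr (solution arr)

-- ===== LEMMAS AND PROOFS =====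

-- The two loop bodies compute the same value from the same state.
theorem pvTraverse_eq_branch (arr : List Int) (parent : Nat) (score : Int) :
    pvTraverseA arr parent score = pvBranchB arr parent score := by
  rw [pvTraverseA]
  split
  · rename_i h
    rw [PySem.List.pyGet?_natCast] at h
    have hlen := List.getElem?_eq_none_iff.mp h
    rw [pvBranchB, if_pos hlen]
  · rename_i leftScore h
    rw [PySem.List.pyGet?_natCast] at h
    obtain ⟨hlt, hv⟩ := List.getElem?_eq_some_iff.mp h
    rw [pvTraverse_eq_branch]
    conv_rhs => rw [pvBranchB]
    rw [if_neg (by omega : ¬ 2 * parent + 1 ≥ arr.length)]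
    congr 1
    rw [List.getD_eq_getElem?_getD, List.getElem?_eq_getElem hlt, hv]
    by_cases hr : 2 * parent + 2 < arr.length
    · rw [if_pos (show ((2 * parent + 2 : Nat) : Int) ≤ (arr.length : Int) - 1 by push_cast; omega),
          if_pos hr, PySem.List.pyGet?_natCast, List.getD_eq_getElem?_getD]
      simp
    · rw [if_neg (show ¬ ((2 * parent + 2 : Nat) : Int) ≤ (arr.length : Int) - 1 by push_cast; omega),
          if_neg hr]
      simp
termination_by arr.length - parent
decreasing_by omega

theorem pyGet?_one (l : List Int) : PySem.List.pyGet? l 1 = l[1]? := by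
  simp [PySem.List.pyGet?, PySem.List.pyIdx?]
  split_ifs with h
  · simp
  · rw [List.getElem?_eq_none (by omega)]; rfl

theorem pyGet?_two (l : List Int) : PySem.List.pyGet? l 2 = l[2]? := by
  simp [PySem.List.pyGet?, PySem.List.pyIdx?]
  split_ifs with h
  · simp
  · rw [List.getElem?_eq_none (by omega)]; rfl

theorem pvCompare_eq (arr : List Int) : pvCompareA arr = pvCompareB arr := by
  rw [pvCompareA, pvCompareB, pyGet?_one, pyGet?_two]
  by_cases h3 : arr.length < 3
  · rw [if_pos h3]
    by_cases h2 : arr.length ≤ 1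
    · rw [List.getElem?_eq_none h2]
    · rw [List.getElem?_eq_none (show arr.length ≤ 2 by omega)]
      cases arr[1]? <;> rfl
  · rw [if_neg h3]
    rw [List.getElem?_eq_getElem (show 1 < arr.length by omega),
        List.getElem?_eq_getElem (show 2 < arr.length by omega)]
    simp only [List.getD_eq_getElem?_getD,
        List.getElem?_eq_getElem (show 1 < arr.length by omega),
        List.getElem?_eq_getElem (show 2 < arr.length by omega),
        Option.getD_some, pvTraverse_eq_branch]

-- ===== VERDICT (by name: the statement is the Claim_ definition above) =====
theorem solution_spec : Claim_equal_solution := by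
  intro arr _
  unfold Spec_solution solution solution_alt
  exact pvCompare_eq _
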